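-- pv_equiv track=rewrite | github.com/reshmarameshbabu/School-of-Curious | subtraction/subtract.py | insert_val
-- ===== SOURCE A (Python) =====
-- def insert_val(x_p,y_p,val,v,x,y):
--     if(len(x_p)==0):
--         x_p.append(x)
--         y_p.append(y)
--         val.append(v)
--     else:
--         x_p.append(x)
--         y_p.append(y)
--         val.append(v)
--         i=len(x_p)-1
--         while i>0:
--            if x_p[i]<x_p[i-1]:
--                x_p[i],x_p[i-1] =x_p[i-1],x_p[i]
--                y_p[i],y_p[i-1] =y_p[i-1],y_p[i]
--            else:
--                break
--            i-=1
--         j=len(val)-1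
--         while j>i:
--             val[j] = val[j-1]
--             j-=1
--         val[j]=v
--     return x_p,y_p,val
-- ===== SOURCE B (Python) =====
-- def insert_val(x_p, y_p, val, v, x, y):
--     i = len(x_p)
--     while i > 0 and x < x_p[i-1]:
--         i -= 1
--     x_p.insert(i, x)
--     y_p.insert(i, y)
--     val.insert(i, v)
--     return x_p, y_p, val
-- ===== Notes on version B (the rewrite author's own statement) =====
-- stated objective: simpler
-- what changed: Replaces A's interleaved adjacent-swap bubble pass over x_p/y_p plus a separate element-shift loop over val with a single right-to-left index scan followed by three list.insert calls.
-- outside the precondition, e.g. on insert_val([], [], [3], 5, 0, 7): A returns ([0], [7], [3, 5]), B returns ([0], [7], [5, 3])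
import Mathlib
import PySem

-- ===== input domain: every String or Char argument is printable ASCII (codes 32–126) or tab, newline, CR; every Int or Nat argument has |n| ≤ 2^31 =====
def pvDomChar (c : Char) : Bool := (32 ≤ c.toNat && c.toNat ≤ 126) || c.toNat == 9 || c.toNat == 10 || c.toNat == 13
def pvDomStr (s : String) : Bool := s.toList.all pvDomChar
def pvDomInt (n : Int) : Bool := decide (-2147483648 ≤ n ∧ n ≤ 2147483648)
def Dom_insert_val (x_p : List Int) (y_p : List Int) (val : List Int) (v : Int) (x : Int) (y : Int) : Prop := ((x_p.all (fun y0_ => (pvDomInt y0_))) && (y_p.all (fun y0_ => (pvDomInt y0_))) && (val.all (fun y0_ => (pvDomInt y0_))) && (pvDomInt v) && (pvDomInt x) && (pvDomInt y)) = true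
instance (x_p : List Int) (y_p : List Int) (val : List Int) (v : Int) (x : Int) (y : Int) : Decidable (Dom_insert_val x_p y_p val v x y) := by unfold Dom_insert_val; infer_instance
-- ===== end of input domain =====

-- B replaces A's interleaved adjacent-swap pass plus val-shift loop by one index scan and three
-- list.insert calls (objective: simpler). Both A and B mutate their list arguments in place in
-- Python; the equivalence proved here is about the RETURN value only.

-- ===== PORT A =====

-- Python `l[i], l[i-1] = l[i-1], l[i]` (both getD read the pre-swap list). The default 0 of getD
-- and the silent out-of-range set are never reached under Pre_ (Python would raise IndexError there).
def pySwapA (l : List Int) (i : Nat) : List Int :=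
  (l.set i (l.getD (i-1) 0)).set (i-1) (l.getD i 0)

-- A's `while i>0: if x_p[i]<x_p[i-1]: swap both else break; i-=1`; returns the lists and final i.
def bubbleA : List Int → List Int → Nat → List Int × List Int × Nat
  | xp, yp, 0 => (xp, yp, 0)
  | xp, yp, i+1 =>
    if xp.getD (i+1) 0 < xp.getD i 0 then
      bubbleA (pySwapA xp (i+1)) (pySwapA yp (i+1)) i
    else (xp, yp, i+1)

-- A's `while j>i: val[j]=val[j-1]; j-=1`; returns the list and final j.
def shiftA : List Int → Nat → Nat → List Int × Nat
  | val, _, 0 => (val, 0)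
  | val, i, j+1 => if i < j+1 then shiftA (val.set (j+1) (val.getD j 0)) i j else (val, j+1)

def insert_val (x_p : List Int) (y_p : List Int) (val : List Int) (v : Int) (x : Int) (y : Int) : List Int × List Int × List Int :=
  if x_p.length = 0 then (x_p ++ [x], y_p ++ [y], val ++ [v])
  else
    let r := bubbleA (x_p ++ [x]) (y_p ++ [y]) ((x_p ++ [x]).length - 1)
    let s := shiftA (val ++ [v]) r.2.2 ((val ++ [v]).length - 1)
    (r.1, r.2.1, s.1.set s.2 v)

-- ===== PORT B =====

-- B's `i = len(x_p); while i > 0 and x < x_p[i-1]: i -= 1` (index always in range when read).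
def findIdxB (xp : List Int) (x : Int) : Nat → Nat
  | 0 => 0
  | k+1 => if x < xp.getD k 0 then findIdxB xp x k else k+1

def insert_val_alt (x_p : List Int) (y_p : List Int) (val : List Int) (v : Int) (x : Int) (y : Int) : List Int × List Int × List Int :=
  let i := findIdxB x_p x x_p.length
  (PySem.List.insert x_p (i : Int) x, PySem.List.insert y_p (i : Int) y, PySem.List.insert val (i : Int) v)

-- ===== PRECONDITION & SPEC =====

-- Pre_ excludes calls whose three lists are not parallel in the way A's in-place code assumes:
-- with y_p of a different length than x_p (or a nonempty y_p/val alongside an empty x_p) A's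
-- partial adjacent swaps and bare appends place elements at accidental positions or raise
-- IndexError; the harmless short-y_p case where no swap occurs (x_p[-1] <= x) stays inside.
def Pre_insert_val (x_p : List Int) (y_p : List Int) (val : List Int) (v : Int) (x : Int) (y : Int) : Prop :=
  (x_p = [] ∧ y_p = [] ∧ val = []) ∨
  (x_p ≠ [] ∧ (y_p.length = x_p.length ∨
               (y_p.length < x_p.length ∧ x_p.getD (x_p.length - 1) x ≤ x)))
instance (x_p : List Int) (y_p : List Int) (val : List Int) (v : Int) (x : Int) (y : Int) : Decidable (Pre_insert_val x_p y_p val v x y) := by unfold Pre_insert_val; infer_instance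

def pvWitness_insert_val : List Int × List Int × List Int × Int × Int × Int := ([1, 3], [9, 9], [4, 4], 5, 2, 6)

def Spec_insert_val (x_p : List Int) (y_p : List Int) (val : List Int) (v : Int) (x : Int) (y : Int) (out : List Int × List Int × List Int) : Prop := out = insert_val_alt x_p y_p val v x y
instance (x_p : List Int) (y_p : List Int) (val : List Int) (v : Int) (x : Int) (y : Int) (out : List Int × List Int × List Int) : Decidable (Spec_insert_val x_p y_p val v x y out) := by unfold Spec_insert_val; infer_instance

-- ===== CLAIM (what is proved, stated in full; the proofs are below) =====
def Claim_equal_insert_val : Prop := ∀ (x_p : List Int) (y_p : List Int) (val : List Int) (v : Int) (x : Int) (y : Int), Dom_insert_val x_p y_p val v x y → Pre_insert_val x_p y_p val v x y → Spec_insert_val x_p y_p val v x y (insert_val x_p y_p val v x y)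

-- ===== LEMMAS AND PROOFS =====

-- `getD` of the marker element of a list with c inserted at position k (k ≤ length).
lemma getD_mid_self : ∀ (k : Nat) (A : List Int) (c : Int), k ≤ A.length →
    (A.take k ++ c :: A.drop k).getD k 0 = c
  | 0, _, _, _ => by simp
  | k+1, [], _, h => by simp at h
  | k+1, a :: as, c, h => by
    simpa using getD_mid_self k as c (by simpa using h)

-- `getD` below the insertion point reads the original list.
lemma getD_mid_lt : ∀ (k j : Nat) (A : List Int) (c : Int), j < k → k ≤ A.length →
    (A.take k ++ c :: A.drop k).getD j 0 = A.getD j 0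
  | 0, j, _, _, hj, _ => by omega
  | k+1, _, [], _, _, h => by simp at h
  | k+1, 0, a :: as, c, _, _ => by simp
  | k+1, j+1, a :: as, c, hj, h => by
    simpa using getD_mid_lt k j as c (by omega) (by simpa using h)

-- `set` at the insertion point replaces the marker.
lemma set_mid : ∀ (k : Nat) (A : List Int) (c w : Int), k ≤ A.length →
    (A.take k ++ c :: A.drop k).set k w = A.take k ++ w :: A.drop k
  | 0, _, _, _, _ => by simp
  | k+1, [], _, _, h => by simp at h
  | k+1, a :: as, c, w, h => by
    simpa using set_mid k as c w (by simpa using h)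

-- Duplicating A[k] at position k+1 is the same as duplicating it at position k.
lemma mid_shift : ∀ (k : Nat) (A : List Int), k < A.length →
    A.take (k+1) ++ A.getD k 0 :: A.drop (k+1) = A.take k ++ A.getD k 0 :: A.drop k
  | 0, [], h => by simp at h
  | 0, a :: as, _ => by simp
  | k+1, [], h => by simp at h
  | k+1, a :: as, h => by
    simpa using mid_shift k as (by simpa using h)

-- A's adjacent swap moves the inserted element one slot left.
lemma swap_mid (k : Nat) (A : List Int) (x : Int) (h : k < A.length) :
    pySwapA (A.take (k+1) ++ x :: A.drop (k+1)) (k+1) = A.take k ++ x :: A.drop k := by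
  unfold pySwapA
  rw [show k + 1 - 1 = k from rfl]
  rw [getD_mid_lt (k+1) k A x (by omega) (by omega),
      getD_mid_self (k+1) A x (by omega),
      set_mid (k+1) A x (A.getD k 0) (by omega),
      mid_shift k A h,
      set_mid k A (A.getD k 0) x (by omega)]

lemma findIdxB_le (A : List Int) (x : Int) : ∀ k, findIdxB A x k ≤ k
  | 0 => by simp [findIdxB]
  | k+1 => by
    unfold findIdxB
    split
    · exact le_trans (findIdxB_le A x k) (by omega)
    · exact le_refl _

-- The bubble pass lands the two inserted elements exactly at B's scan index.
lemma bubble_eq : ∀ (k : Nat) (A B : List Int) (x y : Int), k ≤ A.length → k ≤ B.length →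
    bubbleA (A.take k ++ x :: A.drop k) (B.take k ++ y :: B.drop k) k
      = (A.take (findIdxB A x k) ++ x :: A.drop (findIdxB A x k),
         B.take (findIdxB A x k) ++ y :: B.drop (findIdxB A x k),
         findIdxB A x k)
  | 0, A, B, x, y, _, _ => by simp [bubbleA, findIdxB]
  | k+1, A, B, x, y, hA, hB => by
    unfold bubbleA findIdxB
    rw [getD_mid_self (k+1) A x hA, getD_mid_lt (k+1) k A x (by omega) hA]
    split
    · rw [swap_mid k A x (by omega), swap_mid k B y (by omega)]
      exact bubble_eq k A B x y (by omega) (by omega)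
    · rfl

lemma shift_ret (L : List Int) (i j : Nat) (h : j ≤ i) : shiftA L i j = (L, j) := by
  cases j with
  | zero => simp [shiftA]
  | succ j' => simp [shiftA, show ¬ i < j' + 1 by omega]

-- The shift loop slides the hole from position j down to position i.
lemma shift_eq : ∀ (j : Nat) (V : List Int) (i : Nat) (c : Int), i ≤ j → j ≤ V.length →
    shiftA (V.take j ++ c :: V.drop j) i j
      = (V.take i ++ (if i < j then V.getD i 0 else c) :: V.drop i, i)
  | 0, V, i, c, hi, _ => by
    have : i = 0 := by omega
    subst this
    simp [shiftA]
  | j+1, V, i, c, hi, hV => by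
    unfold shiftA
    by_cases hij : i < j + 1
    · rw [if_pos hij]
      rw [getD_mid_lt (j+1) j V c (by omega) hV,
          set_mid (j+1) V c (V.getD j 0) hV,
          mid_shift j V (by omega)]
      rw [shift_eq j V i (V.getD j 0) (by omega) (by omega)]
      congr 2
      by_cases h2 : i < j
      · rw [if_pos h2, if_pos hij]
      · have : i = j := by omega
        subst this
        rw [if_neg h2, if_pos hij]
    · rw [if_neg hij]
      have : i = j + 1 := by omega
      subst this
      simp

-- A's whole val handling (append, shift, overwrite) produces a clamped insert at i.
lemma valA_eq (val : List Int) (i : Nat) (v : Int) :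
    (shiftA (val ++ [v]) i val.length).1.set (shiftA (val ++ [v]) i val.length).2 v
      = val.take i ++ v :: val.drop i := by
  have hform : val ++ [v] = val.take val.length ++ v :: val.drop val.length := by simp
  by_cases h : i ≤ val.length
  · rw [hform, shift_eq val.length val i v h (le_refl _)]
    exact set_mid i val _ v h
  · rw [shift_ret (val ++ [v]) i val.length (by omega)]
    have h1 : (val ++ [v]).set val.length v = val ++ [v] := by
      rw [hform, set_mid val.length val v v (le_refl _)]
    rw [h1, List.take_of_length_le (by omega), List.drop_of_length_le (by omega), hform]

-- B's Python list.insert at a Nat position is a clamped take/drop insert.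
lemma insertB_eq (val : List Int) (i : Nat) (v : Int) :
    PySem.List.insert val (i : Int) v = val.take i ++ v :: val.drop i := by
  by_cases h : i ≤ val.length
  · exact PySem.List.insert_natCast val i v h
  · simp only [PySem.List.insert, PySem.List.sliceIndices]
    norm_num
    rw [if_neg (show ¬ ((i : Int) < 0) by omega)]
    rw [show (min (i : Int) (val.length : Int)).toNat = val.length by omega,
      List.take_of_length_le (show val.length ≤ i by omega),
      List.drop_of_length_le (show val.length ≤ i by omega),
      List.take_length, List.drop_length]

-- ===== VERDICT (by name: the statement is the Claim_ definition above) =====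
theorem insert_val_spec : Claim_equal_insert_val := by
  intro x_p y_p val v x y _ hpre
  unfold Spec_insert_val
  cases x_p with
  | nil =>
    rcases hpre with ⟨_, hy, hv⟩ | ⟨hne, _⟩
    · subst hy; subst hv
      simp [insert_val, insert_val_alt, findIdxB, PySem.List.insert_zero]
    · exact absurd rfl hne
  | cons a as =>
    rcases hpre with ⟨h0, _⟩ | ⟨_, hpar⟩
    · exact absurd h0 (by simp)
    · have hxform : a :: as ++ [x]
          = (a :: as).take (as.length + 1) ++ x :: (a :: as).drop (as.length + 1) := by
        simp
      simp only [insert_val, insert_val_alt, List.length_append, List.length_cons,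
        List.length_nil, Nat.add_sub_cancel]
      rw [if_neg (by omega : ¬ (as.length + 1 = 0))]
      rcases hpar with heq | ⟨hlt, hle⟩
      · -- equal-length parallel arrays: the bubble pass is an insert at the scan index
        simp only [List.length_cons] at heq
        have hyform : y_p ++ [y] = y_p.take (as.length + 1) ++ y :: y_p.drop (as.length + 1) := by
          rw [← heq]; simp
        rw [hxform, hyform,
          bubble_eq (as.length + 1) (a :: as) y_p x y (by simp) (by omega)]
        dsimp only
        rw [valA_eq, insertB_eq, insertB_eq, insertB_eq]
      · -- y_p shorter but no swap occurs: both sides append / clamp-insert at the end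
        simp only [List.length_cons] at hlt
        simp only [List.length_cons, Nat.add_sub_cancel] at hle
        have hgd0 : (a :: as).getD as.length 0 = (a :: as).getD as.length x := by
          rw [List.getD_eq_getElem _ _ (by simp), List.getD_eq_getElem _ _ (by simp)]
        have hnoswap : ¬ x < (a :: as).getD as.length 0 := by rw [hgd0]; omega
        have hfind : findIdxB (a :: as) x (as.length + 1) = as.length + 1 := by
          simp only [findIdxB]
          rw [if_neg hnoswap]
        have h1 : (a :: as ++ [x]).getD (as.length + 1) 0 = x := by
          rw [hxform]; exact getD_mid_self (as.length + 1) (a :: as) x (by simp)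
        have h2 : (a :: as ++ [x]).getD as.length 0 = (a :: as).getD as.length 0 := by
          rw [hxform]; exact getD_mid_lt (as.length + 1) as.length (a :: as) x (by omega) (by simp)
        have hbub : bubbleA (a :: as ++ [x]) (y_p ++ [y]) (as.length + 1)
            = (a :: as ++ [x], y_p ++ [y], as.length + 1) := by
          simp only [bubbleA, h1, h2]
          rw [if_neg hnoswap]
        rw [hbub, hfind]
        dsimp only
        rw [valA_eq, insertB_eq, insertB_eq, insertB_eq,
          List.take_of_length_le (by omega : y_p.length ≤ as.length + 1),
          List.drop_of_length_le (by omega : y_p.length ≤ as.length + 1)]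
        simp
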